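-- pv_equiv track=rewrite | github.com/tboie/universal_phreak_generator | public/scripts/gen_tile_seq.py | arrayToRLE
-- ===== SOURCE A (Python) =====
-- def arrayToRLE(arr):
--     data = ""
--
--     for row in arr:
--         s = ""
--
--         for ele in row:
--             if ele == True or ele == 1:
--                 s += "o"
--             else:
--                 s += "b"
--
--         data += encodeRLE(s) + "$"
--
--     return data
--
-- def encodeRLE(message):
--     encoded_message = ""
--     i = 0
--
--     while (i <= len(message)-1):
--         count = 1
--         ch = message[i]
--         j = i
--         while (j < len(message)-1):
--             if (message[j] == message[j+1]):
--                 count = count+1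
--                 j = j+1
--             else:
--                 break
--         encoded_message=encoded_message+str(count)+ch
--         i = j+1
--     return encoded_message
-- ===== SOURCE B (Python) =====
-- def runLengthsByBoundaries(flags):
--     # positions where the truth value changes, found by comparing adjacent pairs
--     cuts = [i + 1 for i, (x, y) in enumerate(zip(flags, flags[1:])) if x != y]
--     edges = [0] + cuts + [len(flags)]
--     return [b - a for a, b in zip(edges, edges[1:])] if flags else []
--
-- def arrayToRLE(arr):
--     pieces = []
--     for row in arr:
--         flags = [ele == True or ele == 1 for ele in row]
--         cur = flags[0] if flags else False
--         for ln in runLengthsByBoundaries(flags):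
--             pieces.append(str(ln))
--             pieces.append('o' if cur else 'b')
--             cur = not cur
--         pieces.append('$')
--     return ''.join(pieces)
-- ===== Notes on version B (the rewrite author's own statement) =====
-- stated objective: alternative
-- what changed: Instead of scanning runs with an index/while loop and character comparisons, B computes the boundary positions where adjacent cells' truth values differ, derives run lengths as differences of consecutive boundaries, and emits the symbols by pure alternation from the first cell's value (valid because the alphabet is binary), joining the pieces once.
import Mathlib
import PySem

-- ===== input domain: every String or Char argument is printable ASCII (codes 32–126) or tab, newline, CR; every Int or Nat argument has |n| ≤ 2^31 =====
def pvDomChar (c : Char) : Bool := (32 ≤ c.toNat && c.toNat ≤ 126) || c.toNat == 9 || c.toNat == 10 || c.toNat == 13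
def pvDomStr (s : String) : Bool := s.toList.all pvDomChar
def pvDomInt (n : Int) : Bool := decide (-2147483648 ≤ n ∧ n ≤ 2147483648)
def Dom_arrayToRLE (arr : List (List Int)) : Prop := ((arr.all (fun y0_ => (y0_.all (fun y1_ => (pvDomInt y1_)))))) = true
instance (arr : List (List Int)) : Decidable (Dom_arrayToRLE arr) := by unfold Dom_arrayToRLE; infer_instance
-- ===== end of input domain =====

-- B replaces A's index/while run scanner with a boundary-position pass: run lengths are
-- differences of consecutive change positions, symbols alternate from the first cell's value
-- (sound because the alphabet is binary). Objective: alternative. Strings are List Char (PySem).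

-- ===== PORT A =====
-- inner `while (j < len-1): if message[j]==message[j+1] …` — the suffix starting at j is
-- `d :: rest`; `ch` is the char at j, comparison message[j]==message[j+1] is `ch == d`.
def pvInnerA (ch : Char) (count : Nat) : List Char → Nat × List Char
  | [] => (count, [])
  | d :: rest => if ch == d then pvInnerA d (count + 1) rest else (count, d :: rest)

theorem pvInnerA_length : ∀ (l : List Char) (ch : Char) (count : Nat),
    (pvInnerA ch count l).2.length ≤ l.length := by
  intro l
  induction l with
  | nil => intro ch count; simp [pvInnerA]
  | cons d rest ih =>
    intro ch count
    simp only [pvInnerA]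
    split
    · exact Nat.le_trans (ih d (count + 1)) (Nat.le_succ _)
    · simp

-- outer `while (i <= len(message)-1)` of encodeRLE, over the suffix from position i
def pvEncodeRLE : List Char → List Char
  | [] => []
  | c :: rest =>
      let p := pvInnerA c 1 rest
      PySem.Int.toChars (p.1 : Int) ++ [c] ++ pvEncodeRLE p.2
  termination_by l => l.length
  decreasing_by
    simpa using Nat.lt_succ_of_le (pvInnerA_length rest c 1)

def arrayToRLE (arr : List (List Int)) : String :=
  -- `ele == True or ele == 1` on an int is `ele == 1` (True == 1 in Python)
  String.ofList (arr.foldl (fun data row =>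
    data ++ pvEncodeRLE (row.foldl (fun s ele =>
      s ++ [if ele == 1 then 'o' else 'b']) []) ++ ['$']) [])

-- ===== PORT B =====
-- `'o' if cur else 'b'`
def pvCh (cur : Bool) : Char := if cur then 'o' else 'b'

-- `cuts = [i + 1 for i, (x, y) in enumerate(zip(flags, flags[1:])) if x != y]`
def pvCuts (flags : List Bool) : List Int :=
  (PySem.List.enumerate (flags.zip flags.tail)).filterMap
    (fun p => if p.2.1 ≠ p.2.2 then some (p.1 + 1) else none)

-- runLengthsByBoundaries: edges = [0] + cuts + [len(flags)]; diffs of adjacent edges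
def pvRunLengths (flags : List Bool) : List Int :=
  let edges := 0 :: pvCuts flags ++ [(flags.length : Int)]
  if flags.isEmpty then [] else List.zipWith (fun a b => b - a) edges edges.tail

-- `for ln in …: pieces.append(str(ln)); pieces.append('o' if cur else 'b'); cur = not cur`
def pvEmit : List Int → Bool → List Char
  | [], _ => []
  | n :: t, cur => PySem.Int.toChars n ++ [pvCh cur] ++ pvEmit t (!cur)

def arrayToRLE_alt (arr : List (List Int)) : String :=
  String.ofList ((arr.map (fun row =>
    let flags := row.map (fun ele => ele == 1)
    pvEmit (pvRunLengths flags) (flags.headD false) ++ ['$'])).flatten)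

-- ===== PRECONDITION & SPEC =====
def Spec_arrayToRLE (arr : List (List Int)) (out : String) : Prop := out = arrayToRLE_alt arr
instance (arr : List (List Int)) (out : String) : Decidable (Spec_arrayToRLE arr out) := by unfold Spec_arrayToRLE; infer_instance

-- ===== CLAIM (what is proved, stated in full; the proofs are below) =====
def Claim_equal_arrayToRLE : Prop := ∀ (arr : List (List Int)), Dom_arrayToRLE arr → Spec_arrayToRLE arr (arrayToRLE arr)

-- ===== LEMMAS AND PROOFS =====

-- maximal runs of equal chars as (length, char) pairs: the common characterisation
def pvRuns : List Char → List (Nat × Char)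
  | [] => []
  | c :: rest =>
      match pvRuns rest with
      | [] => [(1, c)]
      | (n, d) :: t => if c == d then (n + 1, c) :: t else (1, c) :: (n, d) :: t

theorem pvRuns_cons (c : Char) (l : List Char) :
    pvRuns (c :: l) = match pvRuns l with
      | [] => [(1, c)]
      | (n, d) :: t => if c == d then (n + 1, c) :: t else (1, c) :: (n, d) :: t := rfl

-- A's inner scan computes exactly the first run that pvRuns records
theorem pvInnerA_runs : ∀ (rest : List Char) (c : Char) (k : Nat),
    ∃ n rest', pvInnerA c k rest = (k + n, rest') ∧
      pvRuns (c :: rest) = (n + 1, c) :: pvRuns rest' ∧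
      rest'.length ≤ rest.length := by
  intro rest
  induction rest with
  | nil =>
    intro c k
    exact ⟨0, [], by simp [pvInnerA], by simp [pvRuns], by simp⟩
  | cons d t ih =>
    intro c k
    by_cases h : c = d
    · subst h
      obtain ⟨n, r', h1, h2, h3⟩ := ih c (k + 1)
      refine ⟨n + 1, r', ?_, ?_, Nat.le_trans h3 (Nat.le_succ _)⟩
      · simp [pvInnerA, h1]; omega
      · rw [pvRuns_cons, h2]
        simp
    · obtain ⟨n, r', _, h2, _⟩ := ih d 0
      refine ⟨0, d :: t, by simp [pvInnerA, h], ?_, by simp⟩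
      rw [pvRuns_cons, h2]
      simp [h]

def pvFmt (p : Nat × Char) : List Char := PySem.Int.toChars (p.1 : Int) ++ [p.2]

theorem pvEncodeRLE_eq_runs_aux : ∀ (N : Nat) (l : List Char), l.length ≤ N →
    pvEncodeRLE l = ((pvRuns l).map pvFmt).flatten := by
  intro N
  induction N with
  | zero =>
    intro l hl
    have : l = [] := List.eq_nil_of_length_eq_zero (Nat.le_zero.mp hl)
    subst this; simp [pvEncodeRLE, pvRuns]
  | succ N ih =>
    intro l hl
    match l with
    | [] => simp [pvEncodeRLE, pvRuns]
    | c :: rest =>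
      obtain ⟨n, rest', h1, h2, h3⟩ := pvInnerA_runs rest c 1
      rw [pvEncodeRLE, h2]
      simp only [h1, List.map_cons, List.flatten_cons]
      rw [ih rest' (Nat.le_trans h3 (Nat.le_of_succ_le_succ hl))]
      rw [Nat.add_comm 1 n]
      simp [pvFmt, List.append_assoc]

theorem pvEncodeRLE_eq_runs (l : List Char) :
    pvEncodeRLE l = ((pvRuns l).map pvFmt).flatten :=
  pvEncodeRLE_eq_runs_aux l.length l (Nat.le_refl _)

-- the first run of pvRuns carries the first character
theorem pvRuns_head (c : Char) (l : List Char) :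
    ∃ n t, pvRuns (c :: l) = (n + 1, c) :: t := by
  obtain ⟨n, r', _, h2, _⟩ := pvInnerA_runs l c 0
  exact ⟨n, pvRuns r', h2⟩

-- B-side: recursion-friendly form of the adjacent-difference pass
def pvDf : List Int → List Int
  | x :: y :: t => (y - x) :: pvDf (y :: t)
  | _ => []

theorem pvDf_eq_zipWith : ∀ (l : List Int),
    List.zipWith (fun a b => b - a) l l.tail = pvDf l := by
  intro l
  induction l with
  | nil => simp [pvDf]
  | cons x t ih =>
    cases t with
    | nil => simp [pvDf]
    | cons y r => simp only [List.tail_cons, List.zipWith] at *; simp [pvDf, ih]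

theorem pvDf_shift (c : Int) : ∀ (l : List Int),
    pvDf (l.map (fun x => x + c)) = pvDf l := by
  intro l
  induction l with
  | nil => rfl
  | cons x t ih =>
    cases t with
    | nil => rfl
    | cons y r =>
      simp only [List.map_cons] at *
      simp only [pvDf, ih]
      ring_nf

-- the boundary list obeys a head recursion
theorem pvCuts_cons2 (a b : Bool) (t : List Bool) :
    pvCuts (a :: b :: t) =
      (if a ≠ b then [(1 : Int)] else []) ++ (pvCuts (b :: t)).map (fun x => x + 1) := by
  unfold pvCuts
  simp only [List.zip_cons_cons, List.tail_cons, PySem.List.enumerate_cons]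
  have hshift : ∀ (l : List (Bool × Bool)) (s : Int),
      (PySem.List.enumerate l (s + 1)).filterMap
          (fun p => if p.2.1 ≠ p.2.2 then some (p.1 + 1) else none)
        = ((PySem.List.enumerate l s).filterMap
            (fun p => if p.2.1 ≠ p.2.2 then some (p.1 + 1) else none)).map (fun x => x + 1) := by
    intro l
    induction l with
    | nil => intro s; simp [PySem.List.enumerate_nil]
    | cons p r ih =>
      intro s
      simp only [PySem.List.enumerate_cons, List.filterMap_cons]
      by_cases h : p.1 ≠ p.2
      · simp only [h, if_pos h, List.map_cons]
        rw [ih (s + 1)]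
      · simp only [if_neg h]
        exact ih (s + 1)
  rw [List.filterMap_cons]
  by_cases h : a ≠ b
  · simp only [if_pos h, hshift ((b :: t).zip t) 0, if_pos h]
    norm_num
  · simp only [if_neg h, hshift ((b :: t).zip t) 0]
    simp [h]

theorem pvRunLengths_single (a : Bool) : pvRunLengths [a] = [1] := by
  simp [pvRunLengths, pvCuts, PySem.List.enumerate_nil]

-- pvRunLengths is never empty on a nonempty list (edges ends with the length)
theorem pvRunLengths_cons_ne (a : Bool) (t : List Bool) : pvRunLengths (a :: t) ≠ [] := by
  unfold pvRunLengths
  simp only [List.isEmpty_cons, if_neg]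
  cases h : pvCuts (a :: t) <;> simp [pvDf_eq_zipWith, pvDf]

theorem pvDf_zero_cons (x : Int) (xs : List Int) :
    pvDf (0 :: x :: xs) = x :: pvDf (x :: xs) := by
  simp [pvDf]

theorem pvDf_zero_map (x : Int) (xs : List Int) :
    pvDf (0 :: ((x :: xs).map (fun y => y + 1))) = (x + 1) :: pvDf (x :: xs) := by
  have h := pvDf_shift 1 (x :: xs)
  simp only [List.map_cons] at h ⊢
  simp [pvDf, h]

-- shifting every edge by one bumps only the first difference
theorem pvDf_key_eq (cs : List Int) (L : Int) :
    pvDf (0 :: (cs.map (fun y => y + 1) ++ [L + 1])) =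
      match pvDf (0 :: (cs ++ [L])) with
      | n :: r => (n + 1) :: r
      | [] => [] := by
  have h1 : cs.map (fun y => y + 1) ++ [L + 1] = (cs ++ [L]).map (fun y => y + 1) := by simp
  rw [h1]
  cases hc : cs ++ [L] with
  | nil => simp at hc
  | cons x xs => rw [pvDf_zero_map, pvDf_zero_cons]

-- a new boundary at position 1 contributes a leading run of length 1
theorem pvDf_key_ne (cs : List Int) (L : Int) :
    pvDf (0 :: (1 :: cs.map (fun y => y + 1) ++ [L + 1])) = 1 :: pvDf (0 :: (cs ++ [L])) := by
  have h1 : (1 : Int) :: cs.map (fun y => y + 1) ++ [L + 1]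
      = (0 :: (cs ++ [L])).map (fun y => y + 1) := by simp
  rw [h1, pvDf_zero_map]
  norm_num

theorem pvDf_eq_zipWith' (x : Int) (xs : List Int) :
    List.zipWith (fun a b => b - a) (x :: xs) xs = pvDf (x :: xs) := by
  have h := pvDf_eq_zipWith (x :: xs)
  simpa using h

theorem pvRunLengths_eq_df (flags : List Bool) :
    pvRunLengths flags
      = if flags.isEmpty then []
        else pvDf (0 :: (pvCuts flags ++ [(flags.length : Int)])) := by
  simp [pvRunLengths, pvDf_eq_zipWith']

theorem pvRunLengths_cons2 (a b : Bool) (t : List Bool) :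
    pvRunLengths (a :: b :: t) =
      if a = b then
        match pvRunLengths (b :: t) with
        | n :: r => (n + 1) :: r
        | [] => []
      else 1 :: pvRunLengths (b :: t) := by
  have hL : ((a :: b :: t).length : Int) = ((b :: t).length : Int) + 1 := by simp
  rw [pvRunLengths_eq_df, pvRunLengths_eq_df]
  simp only [List.isEmpty_cons, Bool.false_eq_true, if_false, pvCuts_cons2, hL]
  by_cases h : a = b
  · simp only [h, ne_eq, not_true_eq_false, if_false, if_pos rfl, List.nil_append]
    exact pvDf_key_eq (pvCuts (b :: t)) (((b :: t).length : Int))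
  · simp only [ne_eq, h, not_false_eq_true, if_true, if_neg h, List.cons_append,
      List.nil_append]
    exact pvDf_key_ne (pvCuts (b :: t)) (((b :: t).length : Int))

-- (length, symbol) pairs by alternation, as B emits them
def pvPair : List Int → Bool → List (Int × Char)
  | [], _ => []
  | n :: t, cur => (n, pvCh cur) :: pvPair t (!cur)

theorem pvRuns_eq_pair : ∀ (t : List Bool) (a : Bool),
    (pvRuns ((a :: t).map pvCh)).map (fun p => ((p.1 : Int), p.2))
      = pvPair (pvRunLengths (a :: t)) a := by
  intro t
  induction t with
  | nil =>
    intro a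
    simp [pvRuns, pvRunLengths_single, pvPair]
  | cons b t' ih =>
    intro a
    obtain ⟨m, tr, hr⟩ := pvRuns_head (pvCh b) (t'.map pvCh)
    have hruns : pvRuns ((a :: b :: t').map pvCh)
        = if pvCh a == pvCh b then (m + 1 + 1, pvCh a) :: tr
          else (1, pvCh a) :: (m + 1, pvCh b) :: tr := by
      simp only [List.map_cons] at hr ⊢
      rw [pvRuns_cons, hr]
    have hih := ih b
    simp only [List.map_cons] at hih hr
    rw [hr] at hih
    by_cases h : a = b
    · subst h
      rw [pvRunLengths_cons2]
      simp only [if_pos rfl]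
      cases hlen : pvRunLengths (a :: t') with
      | nil => exact absurd hlen (pvRunLengths_cons_ne a t')
      | cons n r =>
        rw [hlen] at hih
        simp only [List.map_cons, pvPair] at hih
        obtain ⟨hhd, htl⟩ := List.cons_eq_cons.mp hih
        have hn : ((m + 1 : Nat) : Int) = n := (Prod.ext_iff.mp hhd).1
        have hruns2 : pvRuns ((a :: a :: t').map pvCh) = (m + 1 + 1, pvCh a) :: tr := by
          rw [hruns]; simp
        rw [hruns2]
        simp only [List.map_cons, pvPair]
        refine List.cons_eq_cons.mpr ⟨?_, htl⟩
        have hn2 : ((m + 1 + 1 : Nat) : Int) = n + 1 := by push_cast at hn ⊢; omega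
        simp [Prod.ext_iff, hn2]
    · have hch : (pvCh a == pvCh b) = false := by
        cases a <;> cases b <;> simp_all [pvCh]
      have hba : b = !a := by cases a <;> cases b <;> simp_all
      have hruns2 : pvRuns ((a :: b :: t').map pvCh)
          = (1, pvCh a) :: (m + 1, pvCh b) :: tr := by
        rw [hruns, hch]; simp
      rw [hruns2, pvRunLengths_cons2, if_neg h]
      simp only [List.map_cons, pvPair]
      refine List.cons_eq_cons.mpr ⟨by norm_num, ?_⟩
      rw [← hba]
      simp only [List.map_cons] at hih
      exact hih

-- B's emission loop renders exactly the alternating pairs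
theorem pvEmit_eq_pair : ∀ (lens : List Int) (cur : Bool),
    pvEmit lens cur
      = ((pvPair lens cur).map (fun p => PySem.Int.toChars p.1 ++ [p.2])).flatten := by
  intro lens
  induction lens with
  | nil => intro cur; rfl
  | cons n t ih =>
    intro cur
    simp [pvEmit, pvPair, ih (!cur), List.append_assoc]

-- per row: A's encoder+'$' = B's boundary/alternation emission+'$'
theorem pvRow_eq (row : List Int) :
    pvEncodeRLE (row.foldl (fun s ele => s ++ [if ele == 1 then 'o' else 'b']) []) ++ ['$']
      = (let flags := row.map (fun ele => ele == 1)
         pvEmit (pvRunLengths flags) (flags.headD false) ++ ['$']) := by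
  rw [PySem.List.foldl_append_singleton_eq_map]
  simp only [List.nil_append]
  rw [pvEncodeRLE_eq_runs]
  have hmap : row.map (fun ele => if ele == 1 then 'o' else 'b')
      = (row.map (fun ele => ele == 1)).map pvCh := by
    simp [List.map_map, pvCh, Function.comp]
  rw [hmap]
  cases hf : row.map (fun ele => ele == 1) with
  | nil => simp [pvRuns, pvRunLengths, pvEmit, pvCuts, PySem.List.enumerate_nil]
  | cons a t =>
    simp only [List.headD_cons]
    rw [pvEmit_eq_pair, ← pvRuns_eq_pair]
    simp only [List.map_map]
    rfl

theorem pvOuter_fold (arr : List (List Int)) : ∀ (acc : List Char),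
    arr.foldl (fun data row =>
      data ++ pvEncodeRLE (row.foldl (fun s ele =>
        s ++ [if ele == 1 then 'o' else 'b']) []) ++ ['$']) acc
    = acc ++ (arr.map (fun row =>
        let flags := row.map (fun ele => ele == 1)
        pvEmit (pvRunLengths flags) (flags.headD false) ++ ['$'])).flatten := by
  induction arr with
  | nil => intro acc; simp
  | cons row rest ih =>
    intro acc
    simp only [List.foldl_cons, List.map_cons, List.flatten_cons]
    rw [ih, List.append_assoc, ← pvRow_eq row]
    simp [List.append_assoc]

-- ===== VERDICT (by name: the statement is the Claim_ definition above) =====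
theorem arrayToRLE_spec : Claim_equal_arrayToRLE := by
  intro arr _
  unfold Spec_arrayToRLE arrayToRLE arrayToRLE_alt
  rw [pvOuter_fold arr []]
  simp
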